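-- pv_equiv track=rewrite | github.com/MJ702/pythonprogamming | cryptography/method/rsa_algorith.py | find_e
-- ===== SOURCE A (Python) =====
-- def find_e(factor, fey, p, q):
--     possibility = [x for x in range(1, fey + 1)]
--     for i in factor:
--         if i in possibility:
--             possibility.remove(i)
--
--     nonprimes = [j for i in range(2, 8) for j in range(i * 2, 100, i)]
--     primes = [x for x in range(2, 100) if x not in nonprimes]
--
--     for i in possibility:
--         if i != p and i != q and i in primes:
--             return i
-- ===== SOURCE B (Python) =====
-- def _is_prime(n):
--     if n < 2:
--         return False
--     d = 2
--     while d * d <= n: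
--         if n % d == 0:
--             return False
--         d += 1
--     return True
--
--
-- def find_e(factor, fey, p, q):
--     excluded = set(factor)
--     limit = min(fey, 99)
--     n = 2
--     while n <= limit:
--         if n not in excluded and n != p and n != q and _is_prime(n):
--             return n
--         n += 1
--     return None
-- ===== Notes on version B (the rewrite author's own statement) =====
-- stated objective: faster
-- what changed: B drops A's O(fey)-sized possibility list, the per-factor list removals and the sieve-style nonprimes/primes tables; it scans candidates 2..min(fey,99) directly, excluding factor members via a set and testing primality by trial division, returning the first hit.
import Mathlib
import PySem

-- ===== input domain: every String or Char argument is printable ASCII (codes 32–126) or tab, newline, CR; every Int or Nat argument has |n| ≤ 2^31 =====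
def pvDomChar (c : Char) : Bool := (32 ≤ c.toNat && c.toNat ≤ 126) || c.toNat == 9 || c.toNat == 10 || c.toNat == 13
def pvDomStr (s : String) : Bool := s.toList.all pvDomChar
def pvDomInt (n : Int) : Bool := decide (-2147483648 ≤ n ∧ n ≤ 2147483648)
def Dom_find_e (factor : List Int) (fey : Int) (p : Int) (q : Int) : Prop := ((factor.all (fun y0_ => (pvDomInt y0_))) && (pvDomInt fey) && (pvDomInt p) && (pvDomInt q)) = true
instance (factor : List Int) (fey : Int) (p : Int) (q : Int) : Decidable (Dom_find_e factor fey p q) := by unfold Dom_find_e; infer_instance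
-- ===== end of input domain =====

-- B replaces A's O(fey)-sized possibility list, per-factor removals and sieve tables by a
-- direct scan of 2..min(fey,99) with set exclusion and trial-division primality (faster).

-- ===== PORT A =====
def find_e (factor : List Int) (fey : Int) (p : Int) (q : Int) : Option Int :=
  -- possibility = [x for x in range(1, fey + 1)]
  let possibility0 := PySem.List.pyRange 1 (fey + 1) 1
  -- for i in factor: if i in possibility: possibility.remove(i)
  let possibility := factor.foldl
    (fun poss i => if i ∈ poss then (PySem.List.remove? poss i).getD poss else poss)
    possibility0
  -- nonprimes = [j for i in range(2, 8) for j in range(i * 2, 100, i)]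
  let nonprimes := (PySem.List.pyRange 2 8 1).flatMap (fun i => PySem.List.pyRange (i * 2) 100 i)
  -- primes = [x for x in range(2, 100) if x not in nonprimes]
  let primes := (PySem.List.pyRange 2 100 1).filter (fun x => decide (x ∉ nonprimes))
  -- for i in possibility: if i != p and i != q and i in primes: return i
  possibility.find? (fun i => (i != p) && (i != q) && decide (i ∈ primes))

-- ===== PORT B =====
-- trial-division loop of _is_prime; the Nat fuel (n.toNat steps) only makes the while-loop
-- total: the loop exits on its own after at most n-1 increments of d, so the fuel never runs out
def tdGo (n : Int) : Nat → Int → Bool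
  | 0, _ => true
  | fuel + 1, d =>
    if d * d ≤ n then
      (if PySem.Int.mod n d = 0 then false else tdGo n fuel (d + 1))
    else true

def isPrimeAlt (n : Int) : Bool :=
  if n < 2 then false else tdGo n n.toNat 2

-- the candidate while-loop of B; fuel (limit-1).toNat again just totalises the while
def altGo (excl : PySem.Set Int) (p q limit : Int) : Nat → Int → Option Int
  | 0, _ => none
  | fuel + 1, n =>
    if n ≤ limit then
      (if !decide (n ∈ excl) && (n != p) && (n != q) && isPrimeAlt n then some n
       else altGo excl p q limit fuel (n + 1))
    else none

def find_e_alt (factor : List Int) (fey : Int) (p : Int) (q : Int) : Option Int :=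
  let excluded := PySem.Set.ofList factor
  let limit := min fey 99
  altGo excluded p q limit (limit - 1).toNat 2

-- ===== PRECONDITION & SPEC =====
def Spec_find_e (factor : List Int) (fey : Int) (p : Int) (q : Int) (out : Option Int) : Prop := out = find_e_alt factor fey p q
instance (factor : List Int) (fey : Int) (p : Int) (q : Int) (out : Option Int) : Decidable (Spec_find_e factor fey p q out) := by unfold Spec_find_e; infer_instance

-- ===== CLAIM (what is proved, stated in full; the proofs are below) =====
def Claim_equal_find_e : Prop := ∀ (factor : List Int) (fey : Int) (p : Int) (q : Int), Dom_find_e factor fey p q → Spec_find_e factor fey p q (find_e factor fey p q)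

-- ===== LEMMAS AND PROOFS =====

-- the closed prime tables of A, as standalone terms
def aNonprimes : List Int := (PySem.List.pyRange 2 8 1).flatMap (fun i => PySem.List.pyRange (i * 2) 100 i)
def aPrimes : List Int := (PySem.List.pyRange 2 100 1).filter (fun x => decide (x ∉ aNonprimes))

theorem aPrimes_eq : aPrimes =
    [2, 3, 5, 7, 11, 13, 17, 19, 23, 29, 31, 37, 41, 43, 47, 53, 59, 61, 67, 71, 73, 79, 83, 89, 97] := by
  decide

theorem mem_aPrimes_bounds {x : Int} (h : x ∈ aPrimes) : 2 ≤ x ∧ x ≤ 99 := by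
  rw [aPrimes_eq] at h
  fin_cases h <;> norm_num

-- the trial-division test agrees with A's table on 2..99
theorem isPrimeAlt_table : ∀ x ∈ PySem.List.pyRange 2 100 1,
    isPrimeAlt x = decide (x ∈ aPrimes) := by
  have h : (PySem.List.pyRange 2 100 1).all
      (fun x => isPrimeAlt x == decide (x ∈ aPrimes)) = true := by decide
  intro x hx
  have := (List.all_eq_true.mp h) x hx
  exact beq_iff_eq.mp this

-- A's removal fold = filter on a Nodup list
theorem fold_remove_eq_filter (factor : List Int) :
    ∀ (l : List Int), l.Nodup →
      factor.foldl (fun poss i => if i ∈ poss then (PySem.List.remove? poss i).getD poss else poss) l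
        = l.filter (fun x => decide (x ∉ factor)) := by
  induction factor with
  | nil => intro l _; simp
  | cons a rest ih =>
    intro l hnd
    have hstep : (if a ∈ l then (PySem.List.remove? l a).getD l else l) = l.erase a := by
      by_cases h : a ∈ l
      · rw [PySem.List.remove?_eq_some_erase _ _ h]; simp [h]
      · simp [h, List.erase_of_not_mem h]
    rw [List.foldl_cons, hstep, ih _ (hnd.erase a), hnd.erase_eq_filter a,
        List.filter_filter]
    apply List.filter_congr
    intro x _
    by_cases hx1 : x = a <;> by_cases hx2 : x ∈ rest <;> simp [hx1, hx2]

-- find? over a filter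
theorem find?_filter_eq (l : List Int) (p q : Int → Bool) :
    (l.filter q).find? p = l.find? (fun x => q x && p x) := by
  induction l with
  | nil => rfl
  | cons a t ih =>
    by_cases hq : q a
    · by_cases hp : p a <;> simp [hq, hp, ih]
    · simp [hq, ih]

-- characterisation of A
theorem find_e_char (factor : List Int) (fey p q : Int) :
    find_e factor fey p q = (PySem.List.pyRange 1 (fey + 1) 1).find?
      (fun x => decide (x ∉ factor) && ((x != p) && (x != q) && decide (x ∈ aPrimes))) := by
  show (factor.foldl _ (PySem.List.pyRange 1 (fey + 1) 1)).find? _ = _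
  rw [fold_remove_eq_filter factor _ (PySem.List.nodup_pyRange_one _ _),
      find?_filter_eq]
  rfl

-- characterisation of B's loop as find? over a range
theorem altGo_char (excl : PySem.Set Int) (p q limit : Int) :
    ∀ (fuel : Nat) (n : Int), fuel = (limit + 1 - n).toNat →
      altGo excl p q limit fuel n = (PySem.List.pyRange n (limit + 1) 1).find?
        (fun x => !decide (x ∈ excl) && (x != p) && (x != q) && isPrimeAlt x) := by
  intro fuel
  induction fuel with
  | zero =>
    intro n hn
    have : limit + 1 ≤ n := by omega
    rw [PySem.List.pyRange_one_eq_nil this]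
    rfl
  | succ f ih =>
    intro n hn
    have hlt : n < limit + 1 := by omega
    rw [PySem.List.pyRange_one_cons hlt, List.find?_cons]
    have hle : n ≤ limit := by omega
    by_cases hc : (!decide (n ∈ excl) && (n != p) && (n != q) && isPrimeAlt n) = true
    · simp [altGo, hle, hc]
    · rw [Bool.not_eq_true] at hc
      simp only [altGo, if_pos hle, hc, if_neg Bool.false_ne_true]
      exact ih (n + 1) (by omega)

-- find? respects pointwise predicate agreement on the list
theorem find?_congr_mem {l : List Int} {p q : Int → Bool}
    (h : ∀ x ∈ l, p x = q x) : l.find? p = l.find? q := by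
  induction l with
  | nil => rfl
  | cons a t ih =>
    rw [List.find?_cons, List.find?_cons, h a (List.mem_cons_self), ih (fun x hx => h x (List.mem_cons_of_mem a hx))]

-- find? vanishes on a list where the predicate is false everywhere
theorem find?_none_of_false {l : List Int} {p : Int → Bool}
    (h : ∀ x ∈ l, p x = false) : l.find? p = none := by
  apply List.find?_eq_none.mpr
  intro x hx
  simp [h x hx]

-- the two predicates agree on 2..min(fey,99)
theorem pred_agree (factor : List Int) (p q : Int) {x : Int} (h2 : 2 ≤ x) (h99 : x ≤ 99) :
    (decide (x ∉ factor) && ((x != p) && (x != q) && decide (x ∈ aPrimes)))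
      = (!decide (x ∈ PySem.Set.ofList factor) && (x != p) && (x != q) && isPrimeAlt x) := by
  have hmem : (x ∈ PySem.Set.ofList factor) ↔ (x ∈ factor) := PySem.Set.mem_ofList _ _
  have htab : isPrimeAlt x = decide (x ∈ aPrimes) :=
    isPrimeAlt_table x (PySem.List.mem_pyRange_one.mpr ⟨h2, by omega⟩)
  rw [htab]
  by_cases hf : x ∈ factor <;> simp [hf, hmem]

-- ===== VERDICT (by name: the statement is the Claim_ definition above) =====
theorem find_e_spec : Claim_equal_find_e := by
  intro factor fey p q _
  show find_e factor fey p q = find_e_alt factor fey p q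
  rw [find_e_char]
  show _ = altGo (PySem.Set.ofList factor) p q (min fey 99) ((min fey 99) - 1).toNat 2
  rw [altGo_char (PySem.Set.ofList factor) p q (min fey 99) _ 2 (by omega)]
  set m : Int := min fey 99 with hm
  by_cases hfey : fey ≤ 1
  · -- both ranges contain no element satisfying the predicates
    rw [find?_none_of_false, find?_none_of_false]
    · intro x hx
      have := PySem.List.mem_pyRange_one.mp hx
      omega
    · intro x hx
      have hx' := PySem.List.mem_pyRange_one.mp hx
      have : ¬ (x ∈ aPrimes) := fun h => by have := mem_aPrimes_bounds h; omega
      simp [this]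
  · have h2m : 2 ≤ m := by omega
    have hmfey : m ≤ fey := by omega
    rw [PySem.List.pyRange_one_append 1 2 (fey + 1) (by omega) (by omega),
        PySem.List.pyRange_one_append 2 (m + 1) (fey + 1) (by omega) (by omega),
        List.find?_append, List.find?_append]
    have h1 : (PySem.List.pyRange 1 2 1).find?
        (fun x => decide (x ∉ factor) && ((x != p) && (x != q) && decide (x ∈ aPrimes))) = none := by
      apply find?_none_of_false
      intro x hx
      have := PySem.List.mem_pyRange_one.mp hx
      have hx1 : x = 1 := by omega
      have : ¬ (x ∈ aPrimes) := fun h => by have := mem_aPrimes_bounds h; omega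
      simp [this]
    have h3 : (PySem.List.pyRange (m + 1) (fey + 1) 1).find?
        (fun x => decide (x ∉ factor) && ((x != p) && (x != q) && decide (x ∈ aPrimes))) = none := by
      apply find?_none_of_false
      intro x hx
      have hx' := PySem.List.mem_pyRange_one.mp hx
      have : ¬ (x ∈ aPrimes) := fun h => by have := mem_aPrimes_bounds h; omega
      simp [this]
    rw [h1, h3]
    simp only [Option.or_none, Option.none_or]
    apply find?_congr_mem
    intro x hx
    have hx' := PySem.List.mem_pyRange_one.mp hx
    exact pred_agree factor p q hx'.1 (by omega)
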